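-- pv_equiv track=rewrite | github.com/xarturhax/Aois | lab1/src/aois1_lab/arithmetic_operations/addition.py | add_twos_complement
-- ===== SOURCE A (Python) =====
-- def add_twos_complement(num1: int, num2: int) -> tuple:
--     """Correctly add two numbers in two's complement representation"""
--
--     # Convert numbers to binary strings without sign bits
--     def to_binary(n):
--         return bin(abs(n))[2:] if n != 0 else '0'
--
--     max_len = max(len(to_binary(num1)), len(to_binary(num2))) + 1
--
--     # Prepare binary numbers with equal length
--     bin1 = to_binary(num1).zfill(max_len)
--     bin2 = to_binary(num2).zfill(max_len)
--
--     # Perform binary addition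
--     result = []
--     carry = 0
--     for a, b in zip(reversed(bin1), reversed(bin2)):
--         sum_bits = int(a) + int(b) + carry
--         result.append(str(sum_bits % 2))
--         carry = sum_bits // 2
--
--     if carry:
--         result.append('1')
--
--     binary_result = ''.join(reversed(result))
--     decimal_result = num1 + num2  # For verification
--
--     # Handle overflow
--     if num1 > 0 and num2 > 0 and decimal_result < 0:
--         raise OverflowError("Positive overflow")
--     elif num1 < 0 and num2 < 0 and decimal_result > 0:
--         raise OverflowError("Negative overflow")
--
--     return binary_result, decimal_result
-- ===== SOURCE B (Python) =====
-- def add_twos_complement(num1: int, num2: int) -> tuple: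
--     """Add two numbers: closed-form binary conversion instead of a ripple-carry loop."""
--     def nbits(n):
--         return abs(n).bit_length() or 1
--     max_len = max(nbits(num1), nbits(num2)) + 1
--     binary_result = bin(abs(num1) + abs(num2))[2:].zfill(max_len)
--     return binary_result, num1 + num2
-- ===== Notes on version B (the rewrite author's own statement) =====
-- stated objective: simpler
-- what changed: Replaces the per-bit ripple-carry loop over zfilled strings with a closed-form conversion bin(abs(num1)+abs(num2))[2:].zfill(max_len).
import Mathlib
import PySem

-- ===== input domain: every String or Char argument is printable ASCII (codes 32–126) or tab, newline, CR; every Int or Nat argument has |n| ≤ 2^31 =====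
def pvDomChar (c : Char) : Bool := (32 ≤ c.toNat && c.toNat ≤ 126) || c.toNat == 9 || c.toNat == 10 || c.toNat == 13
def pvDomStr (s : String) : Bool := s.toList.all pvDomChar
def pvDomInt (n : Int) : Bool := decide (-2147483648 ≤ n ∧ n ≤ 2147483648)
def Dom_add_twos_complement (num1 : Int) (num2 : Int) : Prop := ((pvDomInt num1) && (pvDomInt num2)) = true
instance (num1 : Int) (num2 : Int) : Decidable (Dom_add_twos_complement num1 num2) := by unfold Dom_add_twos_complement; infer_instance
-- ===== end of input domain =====

-- B replaces A's per-bit ripple-carry loop with a closed-form binary conversion of abs(num1)+abs(num2); same return value everywhere.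

-- ===== PORT A =====

-- bin(n)[2:] for n > 0 (MSB first); returns [] for n = 0 (A never calls it on 0 via to_binary)
def binChars (n : Nat) : List Char :=
  if n = 0 then [] else binChars (n / 2) ++ [if n % 2 = 1 then '1' else '0']
decreasing_by exact Nat.div_lt_self (Nat.pos_of_ne_zero (by assumption)) (by norm_num)

-- to_binary: bin(abs(n))[2:] if n != 0 else '0'
def toBinaryA (n : Int) : List Char := if n ≠ 0 then binChars n.natAbs else ['0']

-- str.zfill
def zfillC (s : List Char) (L : Nat) : List Char := List.replicate (L - s.length) '0' ++ s

-- loop body: sum_bits = int(a)+int(b)+carry; append str(sum_bits % 2); carry = sum_bits // 2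
-- (int(a) is exact here since the characters are always '0' or '1')
def addStepA (st : List Char × Nat) (p : Char × Char) : List Char × Nat :=
  let s := (if p.1 = '1' then 1 else 0) + (if p.2 = '1' then 1 else 0) + st.2
  (st.1 ++ [if s % 2 = 1 then '1' else '0'], s / 2)

def add_twos_complement (num1 : Int) (num2 : Int) : String × Int :=
  let maxLen := max (toBinaryA num1).length (toBinaryA num2).length + 1
  let bin1 := zfillC (toBinaryA num1) maxLen
  let bin2 := zfillC (toBinaryA num2) maxLen
  let rc := (List.zip bin1.reverse bin2.reverse).foldl addStepA ([], 0)
  let result := if rc.2 ≠ 0 then rc.1 ++ ['1'] else rc.1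
  let decimal := num1 + num2
  -- the two OverflowError raises are arithmetically unreachable for exact integers
  -- (num1 > 0 ∧ num2 > 0 → num1+num2 > 0, and symmetrically), so they are omitted
  (String.mk result.reverse, decimal)

-- ===== PORT B =====

-- abs(n).bit_length()
def bitLenB (n : Nat) : Nat :=
  if n = 0 then 0 else bitLenB (n / 2) + 1
decreasing_by exact Nat.div_lt_self (Nat.pos_of_ne_zero (by assumption)) (by norm_num)

-- bin(n)[2:] (Python gives '0' for n = 0)
def binB (n : Nat) : List Char := if n = 0 then ['0'] else binChars n

def add_twos_complement_alt (num1 : Int) (num2 : Int) : String × Int :=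
  let maxLen := max (max (bitLenB num1.natAbs) 1) (max (bitLenB num2.natAbs) 1) + 1
  (String.mk (zfillC (binB (num1.natAbs + num2.natAbs)) maxLen), num1 + num2)

-- ===== PRECONDITION & SPEC =====
def Spec_add_twos_complement (num1 : Int) (num2 : Int) (out : String × Int) : Prop := out = add_twos_complement_alt num1 num2
instance (num1 : Int) (num2 : Int) (out : String × Int) : Decidable (Spec_add_twos_complement num1 num2 out) := by unfold Spec_add_twos_complement; infer_instance

-- ===== CLAIM (what is proved, stated in full; the proofs are below) =====
def Claim_equal_add_twos_complement : Prop := ∀ (num1 : Int) (num2 : Int), Dom_add_twos_complement num1 num2 → Spec_add_twos_complement num1 num2 (add_twos_complement num1 num2)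

-- ===== LEMMAS AND PROOFS =====

-- LSB-first binary digits of n
def natBits (n : Nat) : List Nat :=
  if n = 0 then [] else n % 2 :: natBits (n / 2)
decreasing_by exact Nat.div_lt_self (Nat.pos_of_ne_zero (by assumption)) (by norm_num)

-- value of an LSB-first digit list
def valL : List Nat → Nat
  | [] => 0
  | d :: t => d + 2 * valL t

def padZ (l : List Nat) (L : Nat) : List Nat := l ++ List.replicate (L - l.length) 0

def dchar (d : Nat) : Char := if d = 1 then '1' else '0'

-- digit-level ripple addition, LSB first, with A's trailing-carry rule
def ripple : List Nat → List Nat → Nat → List Nat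
  | x :: xs, y :: ys, c =>
      let s := x + y + c
      (s % 2) :: ripple xs ys (s / 2)
  | _, _, c => if c ≠ 0 then [1] else []

theorem binChars_eq (n : Nat) : binChars n = ((natBits n).map dchar).reverse := by
  fun_induction binChars n with
  | case1 => simp [natBits]
  | case2 n h ih => rw [natBits, if_neg h, ih]; simp [dchar]

theorem natBits_length (n : Nat) : (natBits n).length = bitLenB n := by
  fun_induction natBits n with
  | case1 => simp [bitLenB]
  | case2 n h ih => rw [bitLenB, if_neg h]; simp [ih]

theorem valL_natBits (n : Nat) : valL (natBits n) = n := by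
  fun_induction natBits n with
  | case1 => simp [valL]
  | case2 n h ih => simp [valL, ih]; omega

theorem natBits_lt_pow (n : Nat) : n < 2 ^ (natBits n).length := by
  fun_induction natBits n with
  | case1 => simp
  | case2 n h ih => simp only [List.length_cons, pow_succ]; omega

theorem natBits_digits (n : Nat) : ∀ d ∈ natBits n, d < 2 := by
  fun_induction natBits n with
  | case1 => simp
  | case2 n h ih => intro d hd; rcases List.mem_cons.1 hd with h1 | h1
                    · omega
                    · exact ih d h1

theorem natBits_len_le (n : Nat) : ∀ L, n < 2 ^ L → (natBits n).length ≤ L := by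
  fun_induction natBits n with
  | case1 => intro L _; simp
  | case2 n h ih =>
      intro L hL
      cases L with
      | zero => simp at hL; omega
      | succ L =>
          simp only [List.length_cons]
          have hp : 2 ^ (L + 1) = 2 * 2 ^ L := by rw [pow_succ]; ring
          have := ih L (by omega)
          omega

theorem padZ_succ (v n : Nat) (hle : (natBits v).length ≤ n + 1) :
    padZ (natBits v) (n + 1) = v % 2 :: padZ (natBits (v / 2)) n := by
  by_cases hv : v = 0
  · subst hv
    simp [natBits, padZ, List.replicate_succ]
  · rw [natBits, if_neg hv]
    rw [natBits, if_neg hv] at hle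
    simp only [List.length_cons] at hle
    simp only [padZ, List.length_cons, List.cons_append,
      show n + 1 - ((natBits (v / 2)).length + 1) = n - (natBits (v / 2)).length from by omega]

theorem valL_replicate0 : ∀ k, valL (List.replicate k 0) = 0 := by
  intro k
  induction k with
  | zero => simp [valL]
  | succ k ih => simp [List.replicate_succ, valL, ih]

theorem valL_padZ (l : List Nat) : ∀ L, valL (padZ l L) = valL l := by
  induction l with
  | nil => intro L; simp [padZ, valL_replicate0, valL]
  | cons d t ih =>
      intro L
      have hstep : padZ (d :: t) L = d :: padZ t (L - 1) := by
        simp only [padZ, List.length_cons, List.cons_append,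
          show L - (t.length + 1) = (L - 1) - t.length from by omega]
      rw [hstep]
      simp [valL, ih (L - 1)]

theorem ripple_eq_padZ : ∀ (xs ys : List Nat) (c : Nat),
    xs.length = ys.length → (∀ d ∈ xs, d < 2) → (∀ d ∈ ys, d < 2) → c ≤ 1 →
    valL xs + valL ys + c < 2 ^ xs.length →
    ripple xs ys c = padZ (natBits (valL xs + valL ys + c)) xs.length := by
  intro xs
  induction xs with
  | nil =>
      intro ys c hlen _ _ _ hbound
      have : ys = [] := List.eq_nil_of_length_eq_zero (by simpa using hlen.symm)
      subst this
      simp [valL] at hbound ⊢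
      have : c = 0 := by omega
      subst this
      simp [ripple, natBits, padZ]
  | cons x xs ih =>
      intro ys c hlen hdx hdy hc hbound
      cases ys with
      | nil => simp at hlen
      | cons y ys =>
          have hx : x < 2 := hdx x (by simp)
          have hy : y < 2 := hdy y (by simp)
          simp only [ripple, valL, List.length_cons] at *
          set s := x + y + c with hs
          have hp : 2 ^ (xs.length + 1) = 2 * 2 ^ xs.length := by rw [pow_succ]; ring
          have hv : x + 2 * valL xs + (y + 2 * valL ys) + c
                  = (s % 2) + 2 * (s / 2 + valL xs + valL ys) := by omega
          have hbound' : (s % 2) + 2 * (s / 2 + valL xs + valL ys) < 2 ^ (xs.length + 1) := by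
            omega
          have hb2 : valL xs + valL ys + s / 2 < 2 ^ xs.length := by omega
          have hIH := ih ys (s / 2) (by omega) (fun d hd => hdx d (by simp [hd]))
            (fun d hd => hdy d (by simp [hd])) (by omega) hb2
          have hlenle : (natBits ((s % 2) + 2 * (s / 2 + valL xs + valL ys))).length
                      ≤ xs.length + 1 := natBits_len_le _ _ hbound'
          rw [hv, padZ_succ _ _ hlenle,
            show ((s % 2) + 2 * (s / 2 + valL xs + valL ys)) % 2 = s % 2 from by omega,
            show ((s % 2) + 2 * (s / 2 + valL xs + valL ys)) / 2
               = valL xs + valL ys + s / 2 from by omega]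
          rw [hIH]

theorem fold_ripple : ∀ (xs ys : List Nat) (acc : List Char) (c : Nat),
    xs.length = ys.length → (∀ d ∈ xs, d < 2) → (∀ d ∈ ys, d < 2) → c ≤ 1 →
    (if ((List.zip (xs.map dchar) (ys.map dchar)).foldl addStepA (acc, c)).2 ≠ 0
     then ((List.zip (xs.map dchar) (ys.map dchar)).foldl addStepA (acc, c)).1 ++ ['1']
     else ((List.zip (xs.map dchar) (ys.map dchar)).foldl addStepA (acc, c)).1)
    = acc ++ (ripple xs ys c).map dchar := by
  intro xs
  induction xs with
  | nil =>
      intro ys acc c hlen _ _ hc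
      have : ys = [] := List.eq_nil_of_length_eq_zero (by simpa using hlen.symm)
      subst this
      by_cases h0 : c = 0
      · subst h0; simp [ripple]
      · have hc1 : c = 1 := by omega
        subst hc1; simp [ripple, dchar]
  | cons x xs ih =>
      intro ys acc c hlen hdx hdy hc
      cases ys with
      | nil => simp at hlen
      | cons y ys =>
          have hx : x < 2 := hdx x (by simp)
          have hy : y < 2 := hdy y (by simp)
          simp only [List.map_cons, List.zip_cons_cons, List.foldl_cons, ripple]
          have hstep : addStepA (acc, c) (dchar x, dchar y)
              = (acc ++ [dchar ((x + y + c) % 2)], (x + y + c) / 2) := by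
            have ex : (if x = 1 then (1 : Nat) else 0) = x := by interval_cases x <;> simp
            have ey : (if y = 1 then (1 : Nat) else 0) = y := by interval_cases y <;> simp
            simp [addStepA, dchar, ex, ey]
          rw [hstep]
          have hrec := ih ys (acc ++ [dchar ((x + y + c) % 2)]) ((x + y + c) / 2)
            (by simpa using hlen) (fun d hd => hdx d (by simp [hd]))
            (fun d hd => hdy d (by simp [hd])) (by omega)
          simp only [List.map_cons, List.append_assoc, List.singleton_append] at hrec ⊢
          exact hrec

theorem toBinaryA_length (n : Int) :
    (toBinaryA n).length = max (bitLenB n.natAbs) 1 := by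
  unfold toBinaryA
  by_cases h : n = 0
  · subst h; simp [bitLenB]
  · rw [if_pos h]
    rw [binChars_eq]
    simp [natBits_length]
    have : bitLenB n.natAbs ≠ 0 := by
      rw [← natBits_length]
      intro h0
      have := valL_natBits n.natAbs
      rw [List.eq_nil_of_length_eq_zero h0] at this
      simp [valL] at this
      omega
    omega

theorem map_dchar_replicate (k : Nat) :
    List.map dchar (List.replicate k 0) = List.replicate k '0' := by
  induction k with
  | zero => simp
  | succ k ih => simp [List.replicate_succ, ih, dchar]

theorem rev_zfill_toBinary (n : Int) (L : Nat) (hL : (toBinaryA n).length ≤ L) :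
    (zfillC (toBinaryA n) L).reverse = List.map dchar (padZ (natBits n.natAbs) L) := by
  unfold zfillC padZ
  by_cases h : n = 0
  · subst h
    have h1 : toBinaryA 0 = ['0'] := by simp [toBinaryA]
    rw [h1] at hL ⊢
    have h0 : natBits ((0 : Int).natAbs) = [] := by simp [natBits]
    rw [h0]
    simp only [List.length_singleton, List.length_nil, List.nil_append, Nat.sub_zero,
      map_dchar_replicate, List.reverse_append, List.reverse_cons, List.reverse_nil,
      List.nil_append, List.reverse_replicate]
    simp only [List.length_singleton] at hL
    conv_rhs => rw [show L = (L - 1) + 1 from by omega, List.replicate_succ]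
    rfl
  · simp only [toBinaryA, if_pos h] at *
    rw [binChars_eq]
    simp [map_dchar_replicate, List.reverse_append, dchar]

theorem map_dchar_rev_padZ (t L : Nat) (hle : (binB t).length ≤ L) :
    (List.map dchar (padZ (natBits t) L)).reverse = zfillC (binB t) L := by
  unfold padZ zfillC
  by_cases h : t = 0
  · subst h
    have hL1 : 1 ≤ L := by simpa [binB] using hle
    have h0 : natBits 0 = [] := by simp [natBits]
    have h1 : binB 0 = ['0'] := by simp [binB]
    rw [h0, h1]
    simp only [List.nil_append, List.length_nil, Nat.sub_zero, map_dchar_replicate,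
      List.reverse_replicate, List.length_singleton]
    conv_lhs => rw [show L = (L - 1) + 1 from by omega, List.replicate_succ']
  · simp only [binB, if_neg h] at *
    rw [binChars_eq]
    simp [map_dchar_replicate, List.reverse_append, dchar]

theorem len_padZ (l : List Nat) (L : Nat) (h : l.length ≤ L) : (padZ l L).length = L := by
  simp [padZ]; omega

theorem padZ_digits (l : List Nat) (L : Nat) (h : ∀ d ∈ l, d < 2) :
    ∀ d ∈ padZ l L, d < 2 := by
  intro d hd
  simp only [padZ, List.mem_append] at hd
  rcases hd with h1 | h1
  · exact h d h1
  · have := List.eq_of_mem_replicate h1; omega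

-- ===== VERDICT (by name: the statement is the Claim_ definition above) =====
theorem add_twos_complement_spec : Claim_equal_add_twos_complement := by
  intro num1 num2 _
  unfold Spec_add_twos_complement
  simp only [add_twos_complement, add_twos_complement_alt]
  set a := num1.natAbs
  set b := num2.natAbs
  have hlen1 := toBinaryA_length num1
  have hlen2 := toBinaryA_length num2
  set L := max (toBinaryA num1).length (toBinaryA num2).length + 1 with hLdef
  have hLeq : L = max (max (bitLenB a) 1) (max (bitLenB b) 1) + 1 := by
    rw [hLdef, hlen1, hlen2]
  have hla : (natBits a).length ≤ L := by rw [natBits_length]; omega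
  have hlb : (natBits b).length ≤ L := by rw [natBits_length]; omega
  have ha1 : (toBinaryA num1).length ≤ L := by omega
  have hb1 : (toBinaryA num2).length ≤ L := by omega
  -- bound: a + b < 2^L
  have hba : a < 2 ^ (natBits a).length := natBits_lt_pow a
  have hbb : b < 2 ^ (natBits b).length := natBits_lt_pow b
  have hbound : a + b < 2 ^ L := by
    have h1 : 2 ^ (natBits a).length ≤ 2 ^ (L - 1) :=
      Nat.pow_le_pow_right (by norm_num) (by rw [natBits_length]; omega)
    have h2 : 2 ^ (natBits b).length ≤ 2 ^ (L - 1) :=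
      Nat.pow_le_pow_right (by norm_num) (by rw [natBits_length]; omega)
    have h3 : 2 ^ L = 2 * 2 ^ (L - 1) := by
      conv_lhs => rw [show L = (L - 1) + 1 from by omega]
      rw [pow_succ]; ring
    omega
  -- rewrite the reversed zfilled strings as mapped padded digit lists
  rw [rev_zfill_toBinary num1 L ha1, rev_zfill_toBinary num2 L hb1]
  have hd1 := padZ_digits (natBits a) L (natBits_digits a)
  have hd2 := padZ_digits (natBits b) L (natBits_digits b)
  have hlp1 := len_padZ (natBits a) L hla
  have hlp2 := len_padZ (natBits b) L hlb
  have hfold := fold_ripple (padZ (natBits a) L) (padZ (natBits b) L) [] 0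
    (by rw [hlp1, hlp2]) hd1 hd2 (by omega)
  simp only [List.nil_append] at hfold
  rw [hfold]
  have hval : valL (padZ (natBits a) L) + valL (padZ (natBits b) L) + 0 = a + b := by
    rw [valL_padZ, valL_padZ, valL_natBits, valL_natBits]
    omega
  have hrip := ripple_eq_padZ (padZ (natBits a) L) (padZ (natBits b) L) 0
    (by rw [hlp1, hlp2]) hd1 hd2 (by omega) (by rw [hval, hlp1]; exact hbound)
  rw [hval, hlp1] at hrip
  rw [hrip]
  have hlb2 : (binB (a + b)).length ≤ L := by
    by_cases h : a + b = 0
    · rw [h]; simp [binB, natBits]; omega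
    · simp only [binB, if_neg h, binChars_eq]
      simp [natBits_length]
      rw [← natBits_length]
      exact natBits_len_le _ _ hbound
  rw [map_dchar_rev_padZ (a + b) L hlb2]
  rw [hLeq]
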